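-- pv_equiv track=rewrite | github.com/pwmcclung/newCodeProbs | scroll.py | get_section_id
-- ===== SOURCE A (Python) =====
-- def get_section_id(scroll, sizes):
--     start = -1
--     section = 0
--     while len(sizes) > 0:
--         first = sizes.pop(0)
--         start += first
--         if scroll <= start:
--             return section
--         else:
--             section += 1
--     return -1
-- ===== SOURCE B (Python) =====
-- def get_section_id(scroll, sizes):
--     # Stage 1: cumulative prefix sums of sizes (no mutation of the input).
--     prefixes = []
--     total = 0
--     for s in sizes:
--         total += s
--         prefixes.append(total)
--     # Stage 2: first index whose prefix sum strictly exceeds scroll.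
--     for i, p in enumerate(prefixes):
--         if scroll < p:
--             return i
--     return -1
-- ===== Notes on version B (the rewrite author's own statement) =====
-- stated objective: faster
-- what changed: B is a two-stage pipeline: it first builds the list of cumulative prefix sums (leaving the input unmutated), then returns the first index whose prefix sum strictly exceeds scroll, instead of A's single destructive pop(0) loop with a start=-1 offset.
import Mathlib
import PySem

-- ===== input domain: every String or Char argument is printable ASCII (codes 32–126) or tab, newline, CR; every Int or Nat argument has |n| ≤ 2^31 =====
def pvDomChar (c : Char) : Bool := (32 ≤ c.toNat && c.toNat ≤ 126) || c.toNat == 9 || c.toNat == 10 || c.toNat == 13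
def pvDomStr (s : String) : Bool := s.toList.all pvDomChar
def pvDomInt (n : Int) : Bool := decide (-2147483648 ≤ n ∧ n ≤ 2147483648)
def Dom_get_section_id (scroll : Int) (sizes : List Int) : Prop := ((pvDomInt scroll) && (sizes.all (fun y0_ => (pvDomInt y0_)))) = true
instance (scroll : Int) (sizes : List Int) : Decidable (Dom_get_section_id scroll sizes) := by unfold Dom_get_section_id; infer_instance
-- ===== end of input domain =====

-- B replaces A's destructive pop(0) loop (A mutates sizes; the equivalence here is about
-- the return value only) by a two-stage pipeline: prefix sums, then first index exceeding scroll.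

-- ===== PORT A =====
-- A's while loop: pop first, start += first, test scroll <= start else section += 1
def getSectionIdGo (scroll : Int) (sizes : List Int) (start sec : Int) : Int :=
  match sizes with
  | [] => -1
  | first :: rest =>
    let start' := start + first
    if scroll ≤ start' then sec else getSectionIdGo scroll rest start' (sec + 1)

def get_section_id (scroll : Int) (sizes : List Int) : Int :=
  getSectionIdGo scroll sizes (-1) 0

-- ===== PORT B =====
-- Stage 1 of Source B: the cumulative prefix sums, built with a running total
def prefixSumsFrom (total : Int) (sizes : List Int) : List Int :=
  match sizes with
  | [] => []
  | s :: rest => (total + s) :: prefixSumsFrom (total + s) rest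

-- Stage 2 of Source B: first enumerate index whose prefix sum strictly exceeds scroll, else -1
def firstExceeding (scroll : Int) (i : Int) (prefixes : List Int) : Int :=
  match prefixes with
  | [] => -1
  | p :: rest => if scroll < p then i else firstExceeding scroll (i + 1) rest

def get_section_id_alt (scroll : Int) (sizes : List Int) : Int :=
  firstExceeding scroll 0 (prefixSumsFrom 0 sizes)

-- ===== PRECONDITION & SPEC =====
def Spec_get_section_id (scroll : Int) (sizes : List Int) (out : Int) : Prop := out = get_section_id_alt scroll sizes
instance (scroll : Int) (sizes : List Int) (out : Int) : Decidable (Spec_get_section_id scroll sizes out) := by unfold Spec_get_section_id; infer_instance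

-- ===== CLAIM (what is proved, stated in full; the proofs are below) =====
def Claim_equal_get_section_id : Prop := ∀ (scroll : Int) (sizes : List Int), Dom_get_section_id scroll sizes → Spec_get_section_id scroll sizes (get_section_id scroll sizes)

-- ===== LEMMAS AND PROOFS =====
theorem go_eq_stages (scroll : Int) (sizes : List Int) :
    ∀ (total sec : Int),
      getSectionIdGo scroll sizes (total - 1) sec
        = firstExceeding scroll sec (prefixSumsFrom total sizes) := by
  induction sizes with
  | nil => intro total sec; rfl
  | cons s rest ih =>
    intro total sec
    simp only [getSectionIdGo, prefixSumsFrom, firstExceeding]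
    have h : (scroll ≤ total - 1 + s) ↔ (scroll < total + s) := by omega
    by_cases hc : scroll < total + s
    · rw [if_pos (h.mpr hc), if_pos hc]
    · rw [if_neg (fun hx => hc (h.mp hx)), if_neg hc]
      have e : total - 1 + s = total + s - 1 := by ring
      rw [e, ih]

-- ===== VERDICT (by name: the statement is the Claim_ definition above) =====
theorem get_section_id_spec : Claim_equal_get_section_id := by
  intro scroll sizes _
  unfold Spec_get_section_id get_section_id get_section_id_alt
  simpa using go_eq_stages scroll sizes 0 0
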